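-- pv_equiv track=rewrite | github.com/Maple24/PAT_Solution | a+b.py | func
-- ===== SOURCE A (Python) =====
-- def func(a, b):
--   c = str(int(a)+int(b))
--   list = []
--   count = 0
--   for i in range(0,len(c))[::-1]:
--     if count!= 0 and count%3 == 0 and c[i] is not '-':
--       list.append(",")
--     list.append(c[i])
--     count = count + 1
--
--   result = ""
--   list.reverse()
--   for v in list:
--     result = result + v
--
--   return result
-- ===== SOURCE B (Python) =====
-- def func(a, b):
--     return format(int(a) + int(b), ',')
-- ===== Notes on version B (the rewrite author's own statement) =====
-- stated objective: idiomatic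
-- what changed: Replaces the manual reversed-index loop with comma bookkeeping and the character-by-character string rebuild by a single call to Python's built-in thousands formatting, format(int(a)+int(b), ',').
import Mathlib
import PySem

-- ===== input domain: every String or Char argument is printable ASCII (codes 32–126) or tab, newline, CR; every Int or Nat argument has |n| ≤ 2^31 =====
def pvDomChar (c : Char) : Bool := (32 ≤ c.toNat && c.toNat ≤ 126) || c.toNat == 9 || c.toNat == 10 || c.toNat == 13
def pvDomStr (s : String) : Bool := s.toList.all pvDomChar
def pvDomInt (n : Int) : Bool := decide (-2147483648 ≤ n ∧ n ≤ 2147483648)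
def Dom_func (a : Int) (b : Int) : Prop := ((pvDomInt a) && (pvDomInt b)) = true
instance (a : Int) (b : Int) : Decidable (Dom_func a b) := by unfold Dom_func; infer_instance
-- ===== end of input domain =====

-- B replaces A's manual reversed-index comma loop and char-by-char string rebuild with
-- Python's built-in thousands formatting format(n, ',') (idiomatic closed-form call).

-- ===== PORT A =====
-- str(int(a)+int(b)); loop over range(0,len(c))[::-1] building list with commas; count % 3
-- uses Lean's Int.emod, exact for Python '%' here since count is always ≥ 0 and divisor 3 > 0.
-- c[i] is always in range (i from range(len(c))), so the .getD default is unreachable.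
def func (a : Int) (b : Int) : String :=
  let c : List Char := (PySem.Int.toStr (a + b)).toList
  let idxs : List Int := (PySem.List.pyRange 0 (PySem.List.len c) 1).reverse
  let st : List Char × Int :=
    idxs.foldl (fun (st : List Char × Int) (i : Int) =>
      let ch : Char := (PySem.List.pyGet? c i).getD ' '
      ((if st.2 ≠ 0 ∧ st.2 % 3 = 0 ∧ ch ≠ '-' then st.1 ++ [','] else st.1) ++ [ch],
        st.2 + 1)) ([], 0)
  (st.1.reverse).foldl (fun (result : String) (v : Char) => result.push v) ""

-- ===== PORT B =====
-- hand port of format(n, ','): group the reversed digit list in threes, comma between groups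
def pyGroup3 : List Char → List Char
  | [] => []
  | [d1] => [d1]
  | [d1, d2] => [d1, d2]
  | [d1, d2, d3] => [d1, d2, d3]
  | d1 :: d2 :: d3 :: rest => d1 :: d2 :: d3 :: ',' :: pyGroup3 rest

def func_alt (a : Int) (b : Int) : String :=
  let n := a + b
  let digits := Nat.toDigits 10 n.natAbs
  let grouped := (pyGroup3 digits.reverse).reverse
  String.ofList (if n < 0 then '-' :: grouped else grouped)

-- ===== PRECONDITION & SPEC =====
def Spec_func (a : Int) (b : Int) (out : String) : Prop := out = func_alt a b
instance (a : Int) (b : Int) (out : String) : Decidable (Spec_func a b out) := by unfold Spec_func; infer_instance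

-- ===== CLAIM (what is proved, stated in full; the proofs are below) =====
def Claim_equal_func : Prop := ∀ (a : Int) (b : Int), Dom_func a b → Spec_func a b (func a b)

-- ===== LEMMAS AND PROOFS =====

-- A's loop, phrased directly over the reversed character list with the running count
def aLoop : List Char → List Char → Int → List Char
  | [], lst, _ => lst
  | ch :: rest, lst, count =>
      aLoop rest ((if count ≠ 0 ∧ count % 3 = 0 ∧ ch ≠ '-' then lst ++ [','] else lst) ++ [ch])
        (count + 1)

lemma foldl_eq_aLoop (r : List Char) : ∀ (lst : List Char) (count : Int),
    (r.foldl (fun (st : List Char × Int) (ch : Char) =>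
      ((if st.2 ≠ 0 ∧ st.2 % 3 = 0 ∧ ch ≠ '-' then st.1 ++ [','] else st.1) ++ [ch],
        st.2 + 1)) (lst, count)).1 = aLoop r lst count := by
  induction r with
  | nil => intro lst count; simp [aLoop]
  | cons ch rest ih => intro lst count; simp only [List.foldl_cons, aLoop]; exact ih _ _

lemma map_get_range (c : List Char) :
    (List.range c.length).map (fun k => (PySem.List.pyGet? c ((k : Nat) : Int)).getD ' ') = c := by
  apply List.ext_getElem
  · simp
  · intro i h1 h2
    simp only [List.getElem_map, List.getElem_range, PySem.List.pyGet?_natCast]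
    simp_all

lemma funcList (c : List Char) :
    ((PySem.List.pyRange 0 (PySem.List.len c) 1).reverse.foldl
      (fun (st : List Char × Int) (i : Int) =>
        ((if st.2 ≠ 0 ∧ st.2 % 3 = 0 ∧ (PySem.List.pyGet? c i).getD ' ' ≠ '-' then st.1 ++ [','] else st.1)
          ++ [(PySem.List.pyGet? c i).getD ' '], st.2 + 1)) ([], 0)).1
    = aLoop c.reverse [] 0 := by
  have h1 : PySem.List.pyRange 0 (PySem.List.len c) 1
      = (List.range c.length).map (fun k => ((k : Nat) : Int)) := by
    rw [PySem.List.pyRange_one]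
    simp [PySem.List.len_eq]
  have h2 : (List.range c.length).reverse.map
      (fun k => (PySem.List.pyGet? c ((k : Nat) : Int)).getD ' ') = c.reverse := by
    rw [List.map_reverse, map_get_range]
  rw [h1, ← List.map_reverse, List.foldl_map, ← h2, ← foldl_eq_aLoop, List.foldl_map]

lemma foldl_push (l : List Char) : ∀ (s : String),
    l.foldl (fun (result : String) (v : Char) => result.push v) s = s ++ String.ofList l := by
  induction l with
  | nil => intro s; simp
  | cons ch rest ih =>
      intro s
      simp only [List.foldl_cons, ih]
      rw [String.push_eq_append, String.append_assoc, String.singleton_eq_ofList,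
        ← String.ofList_append]
      rfl

lemma aLoop_append (r : List Char) : ∀ (t lst : List Char) (count : Int),
    (∀ ch ∈ r, ch ≠ '-') → 0 ≤ count → count % 3 = 0 →
    aLoop (r ++ t) lst count =
      aLoop t (lst ++ (if count = 0 ∨ r = [] then [] else [',']) ++ pyGroup3 r)
        (count + r.length) := by
  induction r using pyGroup3.induct with
  | case1 =>
      intro t lst count _ _ _
      simp [pyGroup3]
  | case2 d1 =>
      intro t lst count hr h0 h3
      have hd1 : d1 ≠ '-' := hr d1 (by simp)
      by_cases hc : count = 0 <;>
        simp [aLoop, pyGroup3, hc, h3, hd1]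
  | case3 d1 d2 =>
      intro t lst count hr h0 h3
      have hd1 : d1 ≠ '-' := hr d1 (by simp)
      have hd2 : d2 ≠ '-' := hr d2 (by simp)
      have h1 : ¬((count + 1) % 3 = 0) := by omega
      by_cases hc : count = 0 <;>
        simp [aLoop, pyGroup3, hc, h3, hd1, hd2, h1] <;> ring_nf
  | case4 d1 d2 d3 =>
      intro t lst count hr h0 h3
      have hd1 : d1 ≠ '-' := hr d1 (by simp)
      have hd2 : d2 ≠ '-' := hr d2 (by simp)
      have hd3 : d3 ≠ '-' := hr d3 (by simp)
      have h1 : ¬((count + 1) % 3 = 0) := by omega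
      have h2 : ¬((count + 1 + 1) % 3 = 0) := by omega
      by_cases hc : count = 0 <;>
        simp [aLoop, pyGroup3, hc, h3, hd1, hd2, hd3, h1, h2] <;> ring_nf
  | case5 d1 d2 d3 e hne0 ih =>
      intro t lst count hr h0 h3
      obtain ⟨x, xs, rfl⟩ : ∃ x xs, e = x :: xs :=
        List.exists_cons_of_ne_nil (fun h => hne0 h)
      have hd1 : d1 ≠ '-' := hr d1 (by simp)
      have h1 : ¬((count + 1) % 3 = 0) := by omega
      have h2 : ¬((count + 1 + 1) % 3 = 0) := by omega
      have h3' : (count + 1 + 1 + 1) % 3 = 0 := by omega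
      have hne : ¬(count + 1 + 1 + 1 = 0) := by omega
      have hrest : ∀ ch ∈ x :: xs, ch ≠ '-' := by
        intro ch hch
        apply hr ch
        simp only [List.mem_cons] at hch ⊢
        tauto
      rw [List.cons_append, List.cons_append, List.cons_append, aLoop, aLoop, aLoop,
        if_neg (show ¬((count + 1 + 1) ≠ 0 ∧ (count + 1 + 1) % 3 = 0 ∧ d3 ≠ '-') by simp [h2]),
        if_neg (show ¬((count + 1) ≠ 0 ∧ (count + 1) % 3 = 0 ∧ d2 ≠ '-') by simp [h1])]
      by_cases hc : count = 0
      · rw [if_neg (show ¬(count ≠ 0 ∧ count % 3 = 0 ∧ d1 ≠ '-') by simp [hc])]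
        rw [ih t _ (count + 1 + 1 + 1) hrest (by omega) h3']
        congr 1
        · simp [hc, pyGroup3, List.append_assoc]
        · simp only [List.length_cons]
          push_cast
          ring
      · rw [if_pos (show count ≠ 0 ∧ count % 3 = 0 ∧ d1 ≠ '-' from ⟨hc, h3, hd1⟩)]
        rw [ih t _ (count + 1 + 1 + 1) hrest (by omega) h3']
        congr 1
        · simp [hc, hne, pyGroup3, List.append_assoc]
        · simp only [List.length_cons]
          push_cast
          ring

lemma digits_ne_minus (m : Nat) : ∀ ch ∈ Nat.toDigits 10 m, ch ≠ '-' := by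
  intro ch hch he
  have hd := Nat.isDigit_of_mem_toDigits (by norm_num) (by norm_num) hch
  subst he
  simp [Char.isDigit] at hd

lemma aLoop_minus (lst : List Char) (count : Int) :
    aLoop ['-'] lst count = lst ++ ['-'] := by
  simp [aLoop]

-- ===== VERDICT (by name: the statement is the Claim_ definition above) =====
theorem func_spec : Claim_equal_func := by
  intro a b _
  show func a b = func_alt a b
  simp only [func, func_alt, PySem.Int.toList_toStr, PySem.Int.toChars]
  rw [funcList, foldl_push]
  rw [String.empty_append]
  by_cases hn : a + b < 0
  · simp only [if_pos hn]
    have hds := digits_ne_minus (a+b).natAbs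
    have hrev : ∀ ch ∈ (Nat.toDigits 10 (a+b).natAbs).reverse, ch ≠ '-' := by
      intro ch hch; exact hds ch (List.mem_reverse.mp hch)
    rw [show ('-' :: Nat.toDigits 10 (a+b).natAbs).reverse
        = (Nat.toDigits 10 (a+b).natAbs).reverse ++ ['-'] by simp]
    rw [aLoop_append _ ['-'] [] 0 hrev le_rfl (by norm_num)]
    simp [aLoop_minus]
  · simp only [if_neg hn]
    have htn : (a+b).toNat = (a+b).natAbs := by omega
    rw [htn]
    have hds := digits_ne_minus (a+b).natAbs
    have hrev : ∀ ch ∈ (Nat.toDigits 10 (a+b).natAbs).reverse, ch ≠ '-' := by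
      intro ch hch; exact hds ch (List.mem_reverse.mp hch)
    rw [show (Nat.toDigits 10 (a+b).natAbs).reverse
        = (Nat.toDigits 10 (a+b).natAbs).reverse ++ [] by simp]
    rw [aLoop_append _ [] [] 0 hrev le_rfl (by norm_num)]
    simp [aLoop]
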